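-- pv_equiv track=rewrite | github.com/Shashankk-21/MedAI-HackToFuture3.0 | backend/chatbot.py | _physician_reminder_needed
-- ===== SOURCE A (Python) =====
-- PHYSICIAN_REMINDER_EVERY_N = 3
--
-- def _physician_reminder_needed(history: list, intent: str) -> bool:
--     """
--     Returns True only if:
--     - This is a medical intent AND
--     - The last N assistant messages didn't already include a physician reminder
--     """
--     if intent != "medical":
--         return False
--
--     assistant_turns = [
--         m for m in history if m.get("role") == "assistant"
--     ]
--     recent = assistant_turns[-PHYSICIAN_REMINDER_EVERY_N:]
--     for turn in recent:
--         content = turn.get("content", "").lower()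
--         if "consult" in content and "physician" in content:
--             return False
--     return True
-- ===== SOURCE B (Python) =====
-- PHYSICIAN_REMINDER_EVERY_N = 3
--
-- def _physician_reminder_needed(history: list, intent: str) -> bool:
--     if intent != "medical":
--         return False
--     remaining = PHYSICIAN_REMINDER_EVERY_N
--     for m in reversed(history):
--         if m.get("role") == "assistant":
--             content = m.get("content", "").lower()
--             if "consult" in content and "physician" in content:
--                 return False
--             remaining -= 1
--             if remaining == 0:
--                 break
--     return True
-- ===== Notes on version B (the rewrite author's own statement) =====
-- stated objective: alternative
-- what changed: Instead of materialising the full filtered list of assistant turns and slicing its last 3, B walks the history once in reverse with a remaining-counter and stops as soon as the 3rd-last assistant message (or a reminder) is seen, building no intermediate lists.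
import Mathlib
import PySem

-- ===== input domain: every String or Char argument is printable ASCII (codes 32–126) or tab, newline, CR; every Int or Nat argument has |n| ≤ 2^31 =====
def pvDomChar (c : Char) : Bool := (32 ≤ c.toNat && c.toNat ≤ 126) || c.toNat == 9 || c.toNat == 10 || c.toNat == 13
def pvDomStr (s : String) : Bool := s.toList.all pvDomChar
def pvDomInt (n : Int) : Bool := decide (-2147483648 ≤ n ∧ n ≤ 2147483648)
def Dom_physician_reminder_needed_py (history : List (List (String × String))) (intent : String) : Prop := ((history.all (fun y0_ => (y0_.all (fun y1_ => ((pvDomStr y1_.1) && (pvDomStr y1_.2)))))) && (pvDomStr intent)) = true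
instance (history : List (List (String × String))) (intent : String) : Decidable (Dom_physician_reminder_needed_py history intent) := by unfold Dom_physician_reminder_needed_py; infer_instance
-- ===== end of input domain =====

-- B replaces A's filter-then-slice over the whole history by a single reverse walk with a
-- remaining-counter that stops after the 3rd-last assistant message (objective: alternative).

-- ===== PORT A =====
def pvN : Int := 3  -- PHYSICIAN_REMINDER_EVERY_N

-- the for-loop over `recent` (early return False on a matching turn)
def pvALoop : List (List (String × String)) → Bool
  | [] => true
  | turn :: rest =>
    let content := PySem.Str.lower ((PySem.Dict.ofList turn).getD "content" "")
    if PySem.Str.isIn "consult" content && PySem.Str.isIn "physician" content then false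
    else pvALoop rest

def physician_reminder_needed_py (history : List (List (String × String))) (intent : String) : Bool :=
  if intent ≠ "medical" then false
  else
    let assistant_turns := history.filter
      (fun m => (PySem.Dict.ofList m).get? "role" == some "assistant")
    let recent := PySem.List.slice assistant_turns (some (-pvN)) none
    pvALoop recent

-- ===== PORT B =====
-- the reverse walk: counts down `remaining` on each assistant message, breaks at 0
def pvBLoop : List (List (String × String)) → Int → Bool
  | [], _ => true
  | m :: rest, remaining =>
    if (PySem.Dict.ofList m).get? "role" == some "assistant" then
      let content := PySem.Str.lower ((PySem.Dict.ofList m).getD "content" "")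
      if PySem.Str.isIn "consult" content && PySem.Str.isIn "physician" content then false
      else if remaining - 1 == 0 then true
      else pvBLoop rest (remaining - 1)
    else pvBLoop rest remaining

def physician_reminder_needed_py_alt (history : List (List (String × String))) (intent : String) : Bool :=
  if intent ≠ "medical" then false
  else pvBLoop history.reverse pvN

-- ===== PRECONDITION & SPEC =====
def Spec_physician_reminder_needed_py (history : List (List (String × String))) (intent : String) (out : Bool) : Prop := out = physician_reminder_needed_py_alt history intent
instance (history : List (List (String × String))) (intent : String) (out : Bool) : Decidable (Spec_physician_reminder_needed_py history intent out) := by unfold Spec_physician_reminder_needed_py; infer_instance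

-- ===== CLAIM (what is proved, stated in full; the proofs are below) =====
def Claim_equal_physician_reminder_needed_py : Prop := ∀ (history : List (List (String × String))) (intent : String), Dom_physician_reminder_needed_py history intent → Spec_physician_reminder_needed_py history intent (physician_reminder_needed_py history intent)

-- ===== LEMMAS AND PROOFS =====

def pvIsAsst (m : List (String × String)) : Bool :=
  (PySem.Dict.ofList m).get? "role" == some "assistant"

def pvMatched (m : List (String × String)) : Bool :=
  let content := PySem.Str.lower ((PySem.Dict.ofList m).getD "content" "")
  PySem.Str.isIn "consult" content && PySem.Str.isIn "physician" content

theorem pvALoop_eq_any (l : List (List (String × String))) :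
    pvALoop l = !(l.any pvMatched) := by
  induction l with
  | nil => rfl
  | cons t rest ih =>
    show (if pvMatched t = true then false else pvALoop rest) = !((t :: rest).any pvMatched)
    by_cases hm : pvMatched t = true <;> simp [hm, ih]

theorem pvBLoop_eq_any (l : List (List (String × String))) (k : Int) (hk : 1 ≤ k) :
    pvBLoop l k = !(((l.filter pvIsAsst).take k.toNat).any pvMatched) := by
  induction l generalizing k with
  | nil => simp [pvBLoop]
  | cons m rest ih =>
    show (if pvIsAsst m = true then
            (if pvMatched m = true then false
             else if (k - 1 == 0) = true then true else pvBLoop rest (k - 1))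
          else pvBLoop rest k)
        = !((((m :: rest).filter pvIsAsst).take k.toNat).any pvMatched)
    by_cases ha : pvIsAsst m = true
    · rw [if_pos ha, List.filter_cons_of_pos ha]
      have hkt : k.toNat = (k.toNat - 1) + 1 := by omega
      rw [hkt, List.take_succ_cons, List.any_cons]
      by_cases hm : pvMatched m = true
      · simp [hm]
      · rw [if_neg hm]
        simp only [Bool.not_eq_true] at hm
        by_cases h1 : k = 1
        · subst h1; simp [hm]
        · rw [if_neg (by simp; omega)]
          rw [ih (k - 1) (by omega)]
          have h2 : (k - 1).toNat = k.toNat - 1 := by omega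
          rw [h2]; simp [hm]
    · simp only [Bool.not_eq_true] at ha
      rw [if_neg (by simp [ha]), List.filter_cons_of_neg (by simp [ha])]
      exact ih k hk

-- ===== VERDICT (by name: the statement is the Claim_ definition above) =====
theorem physician_reminder_needed_py_spec : Claim_equal_physician_reminder_needed_py := by
  intro history intent _
  unfold Spec_physician_reminder_needed_py physician_reminder_needed_py physician_reminder_needed_py_alt
  by_cases hi : intent = "medical"
  · simp only [hi, ne_eq, not_true_eq_false, if_false]
    rw [pvBLoop_eq_any _ pvN (by norm_num [pvN])]
    rw [pvALoop_eq_any]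
    have hslice : PySem.List.slice (history.filter (fun m => (PySem.Dict.ofList m).get? "role" == some "assistant")) (some (-pvN)) none
        = (history.filter pvIsAsst).drop ((history.filter pvIsAsst).length - 3) := by
      show PySem.List.slice (history.filter pvIsAsst) (some (-(3:Int))) none = _
      exact PySem.List.slice_from_neg_natCast _ 3 (by norm_num)
    rw [hslice]
    have hfr : history.reverse.filter pvIsAsst = (history.filter pvIsAsst).reverse := by
      simp [List.filter_reverse]
    rw [hfr]
    have hN : pvN.toNat = 3 := by decide
    rw [hN]
    rw [List.take_reverse]
    simp
  · simp [hi]
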